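-- pv_equiv track=rewrite | github.com/rjmsun/rjmsun.github.io | testing/wordle_tester.py | is_word_compatible
-- ===== SOURCE A (Python) =====
-- from typing import List, Dict, Set, Tuple, Optional
--
-- def is_word_compatible(word: str, guess: str, result: List[str]) -> bool:
--     """Check if a word is compatible with a guess result"""
--     word_letters = list(word)
--     guess_letters = list(guess)
--
--     # Check each position
--     for i in range(5):
--         if result[i] == 'green':
--             if word_letters[i] != guess_letters[i]:
--                 return False
--         elif result[i] == 'yellow':
--             if word_letters[i] == guess_letters[i]:
--                 return False
--             if guess_letters[i] not in word:
--                 return False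
--         elif result[i] == 'grey':
--             # Check if letter appears as green/yellow elsewhere
--             has_yellow_or_green = any(
--                 result[j] in ['yellow', 'green'] and guess_letters[j] == guess_letters[i]
--                 for j in range(5)
--             )
--             if not has_yellow_or_green and guess_letters[i] in word:
--                 return False
--
--     # Additional check for yellow letters - count constraints
--     for i in range(5):
--         if result[i] == 'yellow':
--             letter = guess_letters[i]
--             guess_count = sum(1 for j in range(5)
--                             if guess_letters[j] == letter and result[j] in ['yellow', 'green'])
--             word_count = word.count(letter)
--             if word_count < guess_count:
--                 return False
--
--     return True
-- ===== SOURCE B (Python) =====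
-- def is_word_compatible(word, guess, result):
--     """Check if a word is compatible with a guess result"""
--     # One pass over the positions: positional (green/yellow) constraints are
--     # checked immediately; the letter-level constraints are accumulated
--     # (scored-letter counter, grey letters, yellow letters) and verified once
--     # after the pass, so A's inner any()/sum() re-scans disappear.
--     need = {}
--     greys = []
--     yellows = set()
--     for i in range(5):
--         r = result[i]
--         if r == 'green':
--             if word[i] != guess[i]:
--                 return False
--             need[guess[i]] = need.get(guess[i], 0) + 1
--         elif r == 'yellow':
--             if word[i] == guess[i] or guess[i] not in word:
--                 return False
--             need[guess[i]] = need.get(guess[i], 0) + 1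
--             yellows.add(guess[i])
--         elif r == 'grey':
--             greys.append(guess[i])
--     for c in greys:
--         if c not in need and c in word:
--             return False
--     for c in yellows:
--         if word.count(c) < need[c]:
--             return False
--     return True
-- ===== Notes on version B (the rewrite author's own statement) =====
-- stated objective: alternative
-- what changed: B replaces A's two position-loops with inner any()/sum() re-scans by a single pass that checks green/yellow positional constraints immediately while accumulating letter-level constraints (a scored-letter counter, the grey letters, the yellow letters), and verifies the accumulated letter constraints once after the pass.
-- outside the precondition, e.g. on is_word_compatible('ab', 'ab', ['grey', 'grey', 'grey', 'grey', 'grey']): A returns False, B raises IndexError; on is_word_compatible('ba', 'ab', ['yellow', 'grey', 'grey', 'grey', 'grey']): A returns False, B raises IndexError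
import Mathlib
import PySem

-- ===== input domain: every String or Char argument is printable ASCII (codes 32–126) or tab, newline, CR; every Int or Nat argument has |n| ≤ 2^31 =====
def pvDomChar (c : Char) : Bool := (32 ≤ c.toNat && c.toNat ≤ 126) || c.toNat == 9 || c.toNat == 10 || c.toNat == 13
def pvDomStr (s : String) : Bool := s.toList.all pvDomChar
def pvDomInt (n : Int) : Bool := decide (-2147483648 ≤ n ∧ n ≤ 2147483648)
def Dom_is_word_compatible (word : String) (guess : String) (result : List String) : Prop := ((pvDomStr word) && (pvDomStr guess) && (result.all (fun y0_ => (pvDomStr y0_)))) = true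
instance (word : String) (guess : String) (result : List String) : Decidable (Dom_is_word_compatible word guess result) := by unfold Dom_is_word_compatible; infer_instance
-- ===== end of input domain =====

-- B makes ONE pass over the positions, checking the positional (green/yellow) constraints
-- immediately and accumulating the letter-level constraints (scored-letter counter, grey letters,
-- yellow letters), which it verifies once after the pass — A's inner any()/sum() re-scans at every
-- grey/yellow position disappear (alternative decomposition: one pass + letter-level post-checks).

-- ===== PORT A =====
-- 'c in word' / word.count(c) for a single-character c are ported as List.contains / List.count
-- on word's characters (exact for 1-character needles).
def is_word_compatible (word : String) (guess : String) (result : List String) : Bool :=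
  let wl := word.toList
  let gl := guess.toList
  ((PySem.List.pyRange 0 5 1).all (fun i =>
    if PySem.List.pyGetD result i "" == "green" then
      PySem.List.pyGetD wl i ' ' == PySem.List.pyGetD gl i ' '
    else if PySem.List.pyGetD result i "" == "yellow" then
      !(PySem.List.pyGetD wl i ' ' == PySem.List.pyGetD gl i ' ') &&
      wl.contains (PySem.List.pyGetD gl i ' ')
    else if PySem.List.pyGetD result i "" == "grey" then
      !(!((PySem.List.pyRange 0 5 1).any (fun j =>
            (PySem.List.pyGetD result j "" == "yellow" || PySem.List.pyGetD result j "" == "green") &&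
            PySem.List.pyGetD gl j ' ' == PySem.List.pyGetD gl i ' ')) &&
        wl.contains (PySem.List.pyGetD gl i ' '))
    else true))
  &&
  ((PySem.List.pyRange 0 5 1).all (fun i =>
    if PySem.List.pyGetD result i "" == "yellow" then
      !(decide ((wl.count (PySem.List.pyGetD gl i ' ') : Int) <
        ((PySem.List.pyRange 0 5 1).map (fun j =>
          if PySem.List.pyGetD gl j ' ' == PySem.List.pyGetD gl i ' ' &&
             (PySem.List.pyGetD result j "" == "yellow" || PySem.List.pyGetD result j "" == "green")
          then (1 : Int) else 0)).sum))
    else true))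

-- ===== PORT B =====
-- B-side helper: the body of B's single for-loop (early 'return False' = the flag going false and
-- every later step passing the state through); the state is (flag, need, greys, yellows).
def stepB (r : Int → String) (g w : Int → Char) (wl : List Char)
    (acc : Bool × PySem.Dict Char Int × List Char × PySem.Set Char) (i : Int) :
    Bool × PySem.Dict Char Int × List Char × PySem.Set Char :=
  if !acc.1 then acc
  else if r i == "green" then
    if !(w i == g i) then (false, acc.2)
    else (true, acc.2.1.insert (g i) (acc.2.1.getD (g i) 0 + 1), acc.2.2)
  else if r i == "yellow" then
    if w i == g i || !wl.contains (g i) then (false, acc.2)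
    else (true, acc.2.1.insert (g i) (acc.2.1.getD (g i) 0 + 1), acc.2.2.1,
          PySem.Set.add acc.2.2.2 (g i))
  else if r i == "grey" then (acc.1, acc.2.1, acc.2.2.1 ++ [g i], acc.2.2.2)
  else acc

-- need[c] at a yellow letter c is always a present key, so Python's need[c] is ported as getD c 0;
-- iterating the yellows set with all(...) is order-independent, so .all on its element list is exact.
def is_word_compatible_alt (word : String) (guess : String) (result : List String) : Bool :=
  let wl := word.toList
  let gl := guess.toList
  let st := (PySem.List.pyRange 0 5 1).foldl
    (stepB (fun i => PySem.List.pyGetD result i "") (fun i => PySem.List.pyGetD gl i ' ')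
      (fun i => PySem.List.pyGetD wl i ' ') wl)
    (true, PySem.Dict.empty, [], PySem.Set.empty)
  st.1 &&
  st.2.2.1.all (fun c => !(!(st.2.1.contains c) && wl.contains c)) &&
  st.2.2.2.all (fun c => !decide ((wl.count c : Int) < st.2.1.getD c 0))

-- ===== PRECONDITION & SPEC =====
-- Pre_ admits the inputs on which BOTH Pythons return: (case I) every index either program touches
-- is in bounds — result has ≥ 5 entries, coloured-or-grey positions lie inside guess, green/yellow
-- positions lie inside word — and, when a yellow occurs, either guess has 5 characters (A's count
-- pass reads guess[0..4]) or some position already fails its first-pass check (A returns False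
-- before that pass); or (case II) a green/yellow positional check fails at a position k reachable
-- by both programs (prefix in bounds and passing, k in bounds, and if a grey precedes k, A's inner
-- scan at it stays in bounds), so both return False early.  Excluded (see cites): inputs where A
-- early-returns False but B's loop, which keeps scanning to build its tables, hits an
-- out-of-range index and raises.
def Pre_is_word_compatible (word : String) (guess : String) (result : List String) : Prop :=
  ((decide (5 ≤ result.length) &&
    ((List.range 5).all fun i =>
      ((!(result.getD i "" == "green" || result.getD i "" == "yellow" || result.getD i "" == "grey")) ||
        decide (i < guess.toList.length)) &&
      ((!(result.getD i "" == "green" || result.getD i "" == "yellow")) ||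
        decide (i < word.toList.length))) &&
    ((!(result.take 5).contains "yellow" || decide (5 ≤ guess.toList.length)) ||
     ((List.range 5).any fun k =>
       (result.getD k "" == "green" && !(word.toList.getD k ' ' == guess.toList.getD k ' '))
       || (result.getD k "" == "yellow" &&
            (word.toList.getD k ' ' == guess.toList.getD k ' ' ||
             !word.toList.contains (guess.toList.getD k ' ')))
       || (result.getD k "" == "grey" &&
            !((List.range 5).any fun j =>
              (result.getD j "" == "yellow" || result.getD j "" == "green") &&
              guess.toList.getD j ' ' == guess.toList.getD k ' ') &&
            word.toList.contains (guess.toList.getD k ' ')))))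
   ||
   ((List.range 5).any fun k =>
     decide (k < result.length) &&
     ((List.range k).all fun i =>
       (((!(result.getD i "" == "green" || result.getD i "" == "yellow" || result.getD i "" == "grey")) ||
          decide (i < guess.toList.length)) &&
        ((!(result.getD i "" == "green" || result.getD i "" == "yellow")) ||
          decide (i < word.toList.length))) &&
       ((!(result.getD i "" == "green") || (word.toList.getD i ' ' == guess.toList.getD i ' ')) &&
        (!(result.getD i "" == "yellow") ||
         (!(word.toList.getD i ' ' == guess.toList.getD i ' ') &&
          word.toList.contains (guess.toList.getD i ' '))))) &&
     (((!(result.getD k "" == "green" || result.getD k "" == "yellow" || result.getD k "" == "grey")) ||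
        decide (k < guess.toList.length)) &&
      ((!(result.getD k "" == "green" || result.getD k "" == "yellow")) ||
        decide (k < word.toList.length))) &&
     ((result.getD k "" == "green" && !(word.toList.getD k ' ' == guess.toList.getD k ' '))
      || (result.getD k "" == "yellow" &&
           (word.toList.getD k ' ' == guess.toList.getD k ' ' ||
            !word.toList.contains (guess.toList.getD k ' ')))) &&
     ((!((List.range k).any fun i => result.getD i "" == "grey")) ||
      (decide (5 ≤ result.length) &&
       ((List.range 5).all fun j =>
         (!(result.getD j "" == "yellow" || result.getD j "" == "green")) ||
         decide (j < guess.toList.length)))))) = true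
instance (word : String) (guess : String) (result : List String) : Decidable (Pre_is_word_compatible word guess result) := by unfold Pre_is_word_compatible; infer_instance

def pvWitness_is_word_compatible : String × String × List String :=
  ("crane", "slate", ["grey", "grey", "green", "grey", "green"])

def Spec_is_word_compatible (word : String) (guess : String) (result : List String) (out : Bool) : Prop := out = is_word_compatible_alt word guess result
instance (word : String) (guess : String) (result : List String) (out : Bool) : Decidable (Spec_is_word_compatible word guess result out) := by unfold Spec_is_word_compatible; infer_instance

-- ===== CLAIM (what is proved, stated in full; the proofs are below) =====
def Claim_equal_is_word_compatible : Prop := ∀ (word : String) (guess : String) (result : List String), Dom_is_word_compatible word guess result → Pre_is_word_compatible word guess result → Spec_is_word_compatible word guess result (is_word_compatible word guess result)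

-- ===== LEMMAS AND PROOFS =====

def gyCheck (r : Int → String) (g w : Int → Char) (wl : List Char) (i : Int) : Bool :=
  if r i == "green" then w i == g i
  else if r i == "yellow" then !(w i == g i) && wl.contains (g i)
  else true

def extD (r : Int → String) (g : Int → Char) (is : List Int) (d : PySem.Dict Char Int) : PySem.Dict Char Int :=
  is.foldl (fun d j => if r j == "green" || r j == "yellow" then d.insert (g j) (d.getD (g j) 0 + 1) else d) d

def extS (r : Int → String) (g : Int → Char) (is : List Int) (s : PySem.Set Char) : PySem.Set Char :=
  is.foldl (fun s j => if r j == "yellow" then PySem.Set.add s (g j) else s) s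

lemma fold_flag (r : Int → String) (g w : Int → Char) (wl : List Char) :
    ∀ (is : List Int) (st : Bool × PySem.Dict Char Int × List Char × PySem.Set Char),
      (is.foldl (stepB r g w wl) st).1 = (st.1 && is.all (gyCheck r g w wl)) := by
  intro is
  induction is with
  | nil => intro st; simp
  | cons i t ih =>
    intro st
    obtain ⟨b, d, gr, ys⟩ := st
    cases b with
    | false => simp [stepB, ih]
    | true =>
      by_cases hg : (r i == "green") = true
      · by_cases hw : (w i == g i) = true
        · simp [stepB, gyCheck, hg, hw, ih]
        · simp [stepB, gyCheck, hg, Bool.eq_false_iff.mpr hw, ih]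
      · by_cases hy : (r i == "yellow") = true
        · by_cases hw : (w i == g i) = true
          · have hw' : w i = g i := by simpa using hw
            simp [stepB, gyCheck, hg, hy, hw', ih]
          · have hw' : ¬ w i = g i := by simpa using hw
            by_cases hc : wl.contains (g i) = true
            · have hc' : g i ∈ wl := by simpa using hc
              simp [stepB, gyCheck, hg, hy, Bool.eq_false_iff.mpr hw, hc', ih]
            · have hc' : g i ∉ wl := by simpa using hc
              simp [stepB, gyCheck, hg, hy, Bool.eq_false_iff.mpr hw, hc', ih]
        · by_cases hgr : (r i == "grey") = true
          · simp [stepB, gyCheck, hg, hy, hgr, ih]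
          · simp [stepB, gyCheck, hg, hy, hgr, ih]

lemma fold_vals (r : Int → String) (g w : Int → Char) (wl : List Char) :
    ∀ (is : List Int) (d : PySem.Dict Char Int) (gr : List Char) (ys : PySem.Set Char),
      is.all (gyCheck r g w wl) = true →
      is.foldl (stepB r g w wl) (true, d, gr, ys)
        = (true, extD r g is d,
           gr ++ (is.filter (fun j => r j == "grey")).map g, extS r g is ys) := by
  intro is
  induction is with
  | nil => intro d gr ys _; simp [extD, extS]
  | cons i t ih =>
    intro d gr ys hall
    rw [List.all_cons, Bool.and_eq_true] at hall
    obtain ⟨h1, h2⟩ := hall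
    unfold gyCheck at h1
    by_cases hg : (r i == "green") = true
    · rw [if_pos hg] at h1
      have hg' : r i = "green" := by simpa using hg
      simp [stepB, hg', h1, extD, extS, ih _ _ _ h2]
    · rw [if_neg hg] at h1
      have hg' : ¬ r i = "green" := by simpa using hg
      by_cases hy : (r i == "yellow") = true
      · rw [if_pos hy] at h1
        rw [Bool.and_eq_true] at h1
        have hy' : r i = "yellow" := by simpa using hy
        have hw' : ¬ w i = g i := by simpa using h1.1
        have hc' : g i ∈ wl := by simpa using h1.2
        simp [stepB, hy', hw', hc', extD, extS, ih _ _ _ h2]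
      · have hy' : ¬ r i = "yellow" := by simpa using hy
        by_cases hgr : (r i == "grey") = true
        · simp [stepB, hg, hg', hy, hy', hgr, extD, extS, ih _ _ _ h2]
        · simp [stepB, hg, hg', hy, hy', hgr, extD, extS, ih _ _ _ h2]

lemma beq_comm_char (a b : Char) : (a == b) = (b == a) := by
  by_cases h : a = b
  · simp [h]
  · simp [h, Ne.symm h]

lemma extD_getD (r : Int → String) (g : Int → Char) (c : Char) :
    ∀ (is : List Int) (d : PySem.Dict Char Int),
      (extD r g is d).getD c 0
        = d.getD c 0 + (is.countP (fun j => (r j == "green" || r j == "yellow") && (g j == c)) : Int) := by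
  intro is
  induction is with
  | nil => intro d; simp [extD]
  | cons j t ih =>
    intro d
    unfold extD at ih ⊢
    rw [List.foldl_cons, List.countP_cons]
    by_cases h : (r j == "green" || r j == "yellow") = true
    · rw [if_pos h, ih, PySem.Dict.getD_insert, h, Bool.true_and]
      by_cases hc : g j = c
      · rw [if_pos hc.symm, if_pos (by simp [hc]), hc]
        push_cast; ring
      · rw [if_neg (fun hh => hc hh.symm), if_neg (by simp [hc])]
        push_cast; ring
    · rw [if_neg h, ih, Bool.eq_false_iff.mpr h, Bool.false_and, if_neg (by simp)]
      push_cast; ring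

lemma extD_contains (r : Int → String) (g : Int → Char) (c : Char) :
    ∀ (is : List Int) (d : PySem.Dict Char Int),
      (extD r g is d).contains c
        = (d.contains c || is.any (fun j => (r j == "green" || r j == "yellow") && (g j == c))) := by
  intro is
  induction is with
  | nil => intro d; simp [extD]
  | cons j t ih =>
    intro d
    unfold extD at ih ⊢
    rw [List.foldl_cons, List.any_cons]
    by_cases h : (r j == "green" || r j == "yellow") = true
    · rw [if_pos h, ih, PySem.Dict.contains_insert, h, Bool.true_and,
        beq_comm_char c (g j),
        Bool.or_left_comm, Bool.or_assoc]
    · rw [if_neg h, ih, Bool.eq_false_iff.mpr h, Bool.false_and, Bool.false_or]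

lemma extS_mem (r : Int → String) (g : Int → Char) (c : Char) :
    ∀ (is : List Int) (s : PySem.Set Char),
      c ∈ extS r g is s ↔ c ∈ s ∨ ∃ j ∈ is, (r j == "yellow") = true ∧ g j = c := by
  intro is
  induction is with
  | nil => intro s; simp [extS]
  | cons j t ih =>
    intro s
    unfold extS at ih ⊢
    rw [List.foldl_cons]
    by_cases h : (r j == "yellow") = true
    · rw [if_pos h, ih, PySem.Set.mem_add]
      constructor
      · rintro (⟨hs | rfl⟩ | ⟨k, hk, hk2⟩)
        · exact Or.inl hs
        · exact Or.inr ⟨j, by simp, h, rfl⟩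
        · exact Or.inr ⟨k, by simp [hk], hk2⟩
      · rintro (hs | ⟨k, hk, hk2, hk3⟩)
        · exact Or.inl (Or.inl hs)
        · rcases List.mem_cons.mp hk with rfl | hk
          · exact Or.inl (Or.inr hk3.symm)
          · exact Or.inr ⟨k, hk, hk2, hk3⟩
    · rw [if_neg h, ih]
      constructor
      · rintro (hs | ⟨k, hk, hk2, hk3⟩)
        · exact Or.inl hs
        · exact Or.inr ⟨k, by simp [hk], hk2, hk3⟩
      · rintro (hs | ⟨k, hk, hk2, hk3⟩)
        · exact Or.inl hs
        · rcases List.mem_cons.mp hk with rfl | hk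
          · exact absurd hk2 h
          · exact Or.inr ⟨k, hk, hk2, hk3⟩

-- flipped forms of the scored-position predicate, to line A's scans up with B's tables
lemma pred_flip_any (r : Int → String) (g : Int → Char) (c : Char) :
    (fun j => (r j == "yellow" || r j == "green") && g j == c)
      = (fun j => (r j == "green" || r j == "yellow") && (g j == c)) :=
  funext fun j => by rw [Bool.or_comm]

lemma pred_flip_cnt (r : Int → String) (g : Int → Char) (c : Char) :
    (fun j => g j == c && (r j == "yellow" || r j == "green"))
      = (fun j => (r j == "green" || r j == "yellow") && (g j == c)) :=
  funext fun j => by rw [Bool.and_comm, Bool.or_comm]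

-- when every positional (green/yellow) check passes, A's two loops say exactly what B's two
-- letter-level post-checks say
lemma A_eq_checks (L : List Int) (wl : List Char) (r : Int → String) (g w : Int → Char)
    (hall : L.all (gyCheck r g w wl) = true) :
    ((L.all (fun i =>
      if r i == "green" then w i == g i
      else if r i == "yellow" then !(w i == g i) && wl.contains (g i)
      else if r i == "grey" then
        !(!(L.any (fun j => (r j == "yellow" || r j == "green") && g j == g i)) && wl.contains (g i))
      else true))
    &&
    (L.all (fun i =>
      if r i == "yellow" then
        !(decide ((wl.count (g i) : Int) <
          (L.map (fun j => if g j == g i && (r j == "yellow" || r j == "green") then (1 : Int) else 0)).sum))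
      else true)))
    =
    (((L.filter (fun j => r j == "grey")).map g).all
        (fun c => !(!((extD r g L PySem.Dict.empty).contains c) && wl.contains c)) &&
      (extS r g L PySem.Set.empty).all
        (fun c => !decide ((wl.count c : Int) < (extD r g L PySem.Dict.empty).getD c 0))) := by
  have hallP := List.all_eq_true.mp hall
  rw [Bool.eq_iff_iff]
  simp only [PySem.List.sum_map_ite_one_zero]
  simp only [Bool.and_eq_true, List.all_eq_true]
  constructor
  · rintro ⟨h1, h2⟩
    constructor
    · intro c hc
      simp only [List.mem_map, List.mem_filter] at hc
      obtain ⟨i, ⟨hi, hgrey⟩, rfl⟩ := hc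
      have hgrey' : r i = "grey" := by simpa using hgrey
      have hA := h1 i hi
      rw [if_neg (by simp [hgrey']), if_neg (by simp [hgrey']), if_pos hgrey] at hA
      rw [extD_contains, PySem.Dict.contains_empty, Bool.false_or, ← pred_flip_any]
      exact hA
    · intro c hc
      have := (extS_mem r g c L PySem.Set.empty).mp hc
      rcases this with hs | ⟨i, hi, hy, rfl⟩
      · simp [PySem.Set.empty] at hs
      · have hA := h2 i hi
        rw [if_pos hy] at hA
        rw [extD_getD, PySem.Dict.getD_empty, zero_add, ← pred_flip_cnt]
        exact hA
  · rintro ⟨hgreyall, hyall⟩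
    constructor
    · intro i hi
      have hgc := hallP i hi
      unfold gyCheck at hgc
      by_cases hg : (r i == "green") = true
      · rw [if_pos hg] at hgc ⊢
        exact hgc
      · rw [if_neg hg] at hgc ⊢
        by_cases hy : (r i == "yellow") = true
        · rw [if_pos hy] at hgc ⊢
          exact hgc
        · rw [if_neg hy] at hgc ⊢
          by_cases hgr : (r i == "grey") = true
          · rw [if_pos hgr]
            have hb := hgreyall (g i) (by
              simp only [List.mem_map, List.mem_filter]
              exact ⟨i, ⟨hi, hgr⟩, rfl⟩)
            rw [extD_contains, PySem.Dict.contains_empty, Bool.false_or, ← pred_flip_any] at hb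
            exact hb
          · rw [if_neg hgr]
    · intro i hi
      by_cases hy : (r i == "yellow") = true
      · rw [if_pos hy]
        have hb := hyall (g i) ((extS_mem r g (g i) L PySem.Set.empty).mpr (Or.inr ⟨i, hi, hy, rfl⟩))
        rw [extD_getD, PySem.Dict.getD_empty, zero_add] at hb
        rw [pred_flip_cnt]
        exact hb
      · rw [if_neg hy]

-- the two ports agree on EVERY input (Pre_ is not needed by the proof; it only marks where the
-- Pythons themselves return normally)
lemma ports_eq (word : String) (guess : String) (result : List String) :
    is_word_compatible word guess result = is_word_compatible_alt word guess result := by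
  simp only [is_word_compatible, is_word_compatible_alt]
  by_cases hall : (PySem.List.pyRange 0 5 1).all
      (gyCheck (fun i => PySem.List.pyGetD result i "") (fun i => PySem.List.pyGetD guess.toList i ' ')
        (fun i => PySem.List.pyGetD word.toList i ' ') word.toList) = true
  · rw [fold_vals _ _ _ _ (PySem.List.pyRange 0 5 1) PySem.Dict.empty [] PySem.Set.empty hall]
    simp only [List.nil_append, Bool.true_and]
    exact A_eq_checks (PySem.List.pyRange 0 5 1) word.toList
      (fun i => PySem.List.pyGetD result i "")
      (fun i => PySem.List.pyGetD guess.toList i ' ')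
      (fun i => PySem.List.pyGetD word.toList i ' ') hall
  · rw [fold_flag]
    rw [Bool.eq_false_iff.mpr hall, Bool.and_false, Bool.false_and, Bool.false_and]
    have hA1 : (PySem.List.pyRange 0 5 1).all (fun i =>
      if PySem.List.pyGetD result i "" == "green" then
        PySem.List.pyGetD word.toList i ' ' == PySem.List.pyGetD guess.toList i ' '
      else if PySem.List.pyGetD result i "" == "yellow" then
        !(PySem.List.pyGetD word.toList i ' ' == PySem.List.pyGetD guess.toList i ' ') &&
        word.toList.contains (PySem.List.pyGetD guess.toList i ' ')
      else if PySem.List.pyGetD result i "" == "grey" then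
        !(!((PySem.List.pyRange 0 5 1).any (fun j =>
              (PySem.List.pyGetD result j "" == "yellow" || PySem.List.pyGetD result j "" == "green") &&
              PySem.List.pyGetD guess.toList j ' ' == PySem.List.pyGetD guess.toList i ' ')) &&
          word.toList.contains (PySem.List.pyGetD guess.toList i ' '))
      else true) = false := by
      rw [Bool.eq_false_iff]
      intro hcon
      apply hall
      rw [List.all_eq_true] at hcon ⊢
      intro i hi
      have := hcon i hi
      unfold gyCheck
      by_cases hg : (PySem.List.pyGetD result i "" == "green") = true
      · rwa [if_pos hg] at this ⊢
      · rw [if_neg hg] at this ⊢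
        by_cases hy : (PySem.List.pyGetD result i "" == "yellow") = true
        · rwa [if_pos hy] at this ⊢
        · rw [if_neg hy]
    rw [hA1, Bool.false_and]

-- ===== VERDICT (by name: the statement is the Claim_ definition above) =====
theorem is_word_compatible_spec : Claim_equal_is_word_compatible := by
  intro word guess result _ _
  exact ports_eq word guess result
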